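-- pv_equiv track=rewrite | github.com/pypi-data/pypi-mirror-359 | packages/logbuch/logbuch-1.0.0-py3-none-any.whl/logbuch/features/autopilot.py | _identify_task_patterns
-- ===== SOURCE A (Python) =====
-- from typing import Dict, List, Optional, Any, Tuple
--
-- def _identify_task_patterns(tasks: List[Dict]) -> List[str]:
--     patterns = []
--
--     # Look for recurring patterns
--     titles = [task.get('title', '').lower() for task in tasks]
--
--     # Common productivity patterns
--     if any('meeting' in title for title in titles):
--         patterns.append("meeting_preparation")
--     if any('email' in title for title in titles):
--         patterns.append("email_management")
--     if any('review' in title for title in titles):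
--         patterns.append("regular_reviews")
--     if any('plan' in title for title in titles):
--         patterns.append("planning_sessions")
--
--     return patterns
-- ===== SOURCE B (Python) =====
-- def _identify_task_patterns(tasks):
--     # One pass over tasks maintaining four boolean flags, then build the
--     # patterns list in the fixed order (same values as the original).
--     meeting = email = review = plan = False
--     for task in tasks:
--         title = task.get('title', '').lower()
--         meeting = meeting or ('meeting' in title)
--         email = email or ('email' in title)
--         review = review or ('review' in title)
--         plan = plan or ('plan' in title)
--     patterns = []
--     if meeting:
--         patterns.append("meeting_preparation")
--     if email:
--         patterns.append("email_management")
--     if review: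
--         patterns.append("regular_reviews")
--     if plan:
--         patterns.append("planning_sessions")
--     return patterns
-- ===== Notes on version B (the rewrite author's own statement) =====
-- stated objective: alternative
-- what changed: Replaces the intermediate lowered-titles list and four separate any() scans with a single pass over the tasks that accumulates four boolean flags, then emits the pattern strings in the fixed order.
import Mathlib
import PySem

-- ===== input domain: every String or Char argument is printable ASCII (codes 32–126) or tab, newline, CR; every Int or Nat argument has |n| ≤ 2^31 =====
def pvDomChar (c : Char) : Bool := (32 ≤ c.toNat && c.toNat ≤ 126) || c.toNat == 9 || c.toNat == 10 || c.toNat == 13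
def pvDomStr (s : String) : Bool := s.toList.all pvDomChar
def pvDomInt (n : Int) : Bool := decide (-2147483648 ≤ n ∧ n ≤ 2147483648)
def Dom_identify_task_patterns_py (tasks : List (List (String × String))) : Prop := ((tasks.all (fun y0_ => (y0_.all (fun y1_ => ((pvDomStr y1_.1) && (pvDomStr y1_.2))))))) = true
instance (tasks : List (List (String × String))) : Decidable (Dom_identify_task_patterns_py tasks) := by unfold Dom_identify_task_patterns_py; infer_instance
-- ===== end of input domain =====

-- B replaces the lowered-titles list and four separate any-scans by a single
-- fold over the tasks accumulating four boolean flags (alternative decomposition, same cost).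


-- ===== PORT A =====
def identify_task_patterns_py (tasks : List (List (String × String))) : List String :=
  let patterns : List String := []
  let titles := tasks.map (fun task => PySem.Str.lower (PySem.Dict.getD (PySem.Dict.mk task) "title" ""))
  let patterns := if titles.any (fun title => PySem.Str.isIn "meeting" title) then patterns ++ ["meeting_preparation"] else patterns
  let patterns := if titles.any (fun title => PySem.Str.isIn "email" title) then patterns ++ ["email_management"] else patterns
  let patterns := if titles.any (fun title => PySem.Str.isIn "review" title) then patterns ++ ["regular_reviews"] else patterns
  let patterns := if titles.any (fun title => PySem.Str.isIn "plan" title) then patterns ++ ["planning_sessions"] else patterns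
  patterns

-- ===== PORT B =====
def identify_task_patterns_py_alt (tasks : List (List (String × String))) : List String :=
  let flags := tasks.foldl
    (fun (f : Bool × Bool × Bool × Bool) task =>
      let title := PySem.Str.lower (PySem.Dict.getD (PySem.Dict.mk task) "title" "")
      (f.1 || PySem.Str.isIn "meeting" title,
       f.2.1 || PySem.Str.isIn "email" title,
       f.2.2.1 || PySem.Str.isIn "review" title,
       f.2.2.2 || PySem.Str.isIn "plan" title))
    (false, false, false, false)
  (if flags.1 then ["meeting_preparation"] else []) ++
  (if flags.2.1 then ["email_management"] else []) ++
  (if flags.2.2.1 then ["regular_reviews"] else []) ++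
  (if flags.2.2.2 then ["planning_sessions"] else [])

-- ===== PRECONDITION & SPEC =====
def Spec_identify_task_patterns_py (tasks : List (List (String × String))) (out : List String) : Prop := out = identify_task_patterns_py_alt tasks
instance (tasks : List (List (String × String))) (out : List String) : Decidable (Spec_identify_task_patterns_py tasks out) := by unfold Spec_identify_task_patterns_py; infer_instance

-- ===== CLAIM (what is proved, stated in full; the proofs are below) =====
def Claim_equal_identify_task_patterns_py : Prop := ∀ (tasks : List (List (String × String))), Dom_identify_task_patterns_py tasks → Spec_identify_task_patterns_py tasks (identify_task_patterns_py tasks)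

-- ===== LEMMAS AND PROOFS =====

/-- The lowered title of one task, shared by both correctness lemmas. -/
def pvTitle (task : List (String × String)) : String :=
  PySem.Str.lower (PySem.Dict.getD (PySem.Dict.mk task) "title" "")

/-- B's fold computes, in each component, the initial flag OR-ed with the
corresponding `any` over the tasks. -/
lemma flags_foldl (tasks : List (List (String × String))) (a b c d : Bool) :
    tasks.foldl
      (fun (f : Bool × Bool × Bool × Bool) task =>
        let title := PySem.Str.lower (PySem.Dict.getD (PySem.Dict.mk task) "title" "")
        (f.1 || PySem.Str.isIn "meeting" title,
         f.2.1 || PySem.Str.isIn "email" title,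
         f.2.2.1 || PySem.Str.isIn "review" title,
         f.2.2.2 || PySem.Str.isIn "plan" title))
      (a, b, c, d)
    = (a || tasks.any (fun t => PySem.Str.isIn "meeting" (pvTitle t)),
       b || tasks.any (fun t => PySem.Str.isIn "email" (pvTitle t)),
       c || tasks.any (fun t => PySem.Str.isIn "review" (pvTitle t)),
       d || tasks.any (fun t => PySem.Str.isIn "plan" (pvTitle t))) := by
  induction tasks generalizing a b c d with
  | nil => simp
  | cons t ts ih =>
    simp only [List.foldl_cons, List.any_cons, ih, pvTitle, Bool.or_assoc]

-- ===== VERDICT (by name: the statement is the Claim_ definition above) =====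
theorem identify_task_patterns_py_spec : Claim_equal_identify_task_patterns_py := by
  intro tasks _
  unfold Spec_identify_task_patterns_py identify_task_patterns_py identify_task_patterns_py_alt
  rw [flags_foldl]
  simp only [List.any_map, Function.comp_def, pvTitle, Bool.false_or]
  generalize tasks.any (fun t => PySem.Str.isIn "meeting" (PySem.Str.lower (PySem.Dict.getD (PySem.Dict.mk t) "title" ""))) = m
  generalize tasks.any (fun t => PySem.Str.isIn "email" (PySem.Str.lower (PySem.Dict.getD (PySem.Dict.mk t) "title" ""))) = e
  generalize tasks.any (fun t => PySem.Str.isIn "review" (PySem.Str.lower (PySem.Dict.getD (PySem.Dict.mk t) "title" ""))) = r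
  generalize tasks.any (fun t => PySem.Str.isIn "plan" (PySem.Str.lower (PySem.Dict.getD (PySem.Dict.mk t) "title" ""))) = p
  cases m <;> cases e <;> cases r <;> cases p <;> rfl
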